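-- pv_equiv track=rewrite | github.com/rigoudyg/dr2xml | xml_writer/utils.py | iterate_on_string
-- ===== SOURCE A (Python) =====
-- def iterate_on_string(xml_string, separator="\n", verbose=False):
--     """
--     Build an iterator by splitting ``xml_string`` at each ``separator`` and returning each one.
--
--     :param six.string_types xml_string: an xml string that must be split
--     :param six.string_types separator: the separator used to split the string
--     :param bool verbose: should verbose mode be activate?
--     :return: iterator on the string split at the position of each instance of operator.
--     """
--     new_xml_string = xml_string.split(separator)
--     if len(new_xml_string) > 0 and len(new_xml_string[-1]) == 0:
--         new_xml_string.pop()
--     pos_init = 0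
--     for substring in new_xml_string:
--         substring += separator
--         yield (substring, pos_init)
--         pos_init += len(substring)
-- ===== SOURCE B (Python) =====
-- def iterate_on_string(xml_string, separator="\n", verbose=False):
--     # Streaming scan: repeatedly find the next separator in the remaining suffix,
--     # instead of splitting the whole string up front.
--     if not separator:
--         raise ValueError("empty separator")  # str.split raises here too
--     pos = 0
--     rest = xml_string
--     while True:
--         idx = rest.find(separator)
--         if idx == -1:
--             break
--         yield (rest[:idx] + separator, pos)
--         pos += idx + len(separator)
--         rest = rest[idx + len(separator):]
--     if rest:
--         yield (rest + separator, pos)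
-- ===== Notes on version B (the rewrite author's own statement) =====
-- stated objective: alternative
-- what changed: B replaces A's split-the-whole-string-then-iterate with a single streaming scan that repeatedly finds the next separator in the remaining suffix and yields each piece with its running position.
import Mathlib
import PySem

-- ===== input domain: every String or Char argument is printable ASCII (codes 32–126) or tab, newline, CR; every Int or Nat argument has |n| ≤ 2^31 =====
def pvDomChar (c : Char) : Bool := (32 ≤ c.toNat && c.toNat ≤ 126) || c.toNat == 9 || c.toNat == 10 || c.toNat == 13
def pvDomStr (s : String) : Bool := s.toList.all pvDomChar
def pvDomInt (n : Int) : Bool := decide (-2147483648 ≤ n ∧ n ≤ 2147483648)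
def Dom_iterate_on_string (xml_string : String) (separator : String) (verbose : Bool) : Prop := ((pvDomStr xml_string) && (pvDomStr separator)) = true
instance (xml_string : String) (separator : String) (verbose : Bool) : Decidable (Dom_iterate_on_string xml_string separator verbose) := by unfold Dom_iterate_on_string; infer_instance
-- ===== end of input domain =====

-- B replaces split-then-iterate by a streaming find-scan over the remaining suffix (different decomposition, not faster).
-- Both are generators in Python; the ports return the list of yielded pairs.

-- ===== PORT A =====
-- A: split, drop a trailing empty piece, then re-yield each piece with its cumulative position.
def iterate_on_string (xml_string : String) (separator : String) (verbose : Bool) : List (String × Int) :=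
  match PySem.Str.split? xml_string separator with
  | none => []  -- separator = "": str.split raises ValueError; excluded by Pre_
  | some new_xml_string0 =>
    -- if len(new_xml_string) > 0 and len(new_xml_string[-1]) == 0: new_xml_string.pop()
    let new_xml_string :=
      if 0 < new_xml_string0.length ∧ PySem.Str.len (PySem.List.pyGetD new_xml_string0 (-1) "") = 0
      then new_xml_string0.dropLast else new_xml_string0
    (new_xml_string.foldl
      (fun (st : List (String × Int) × Int) substring0 =>
        let substring := substring0 ++ separator
        (st.1 ++ [(substring, st.2)], st.2 + PySem.Str.len substring))
      ([], 0)).1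

-- ===== PORT B =====
-- the while-loop of Source B: rest is the unscanned suffix, pos its absolute position
def pvAltGo (sep : List Char) (hsep : sep ≠ []) (cs : List Char) (pos : Int) : List (String × Int) :=
  let idx := PySem.Chars.find cs sep
  if _h : idx = -1 then
    if cs.isEmpty then [] else [(String.ofList (cs ++ sep), pos)]
  else
    (String.ofList (cs.take idx.toNat ++ sep), pos) ::
      pvAltGo sep hsep (cs.drop (idx.toNat + sep.length)) (pos + idx + sep.length)
termination_by cs.length
decreasing_by
  have hinf : sep <:+: cs := (PySem.Chars.find_ne_neg_one_iff cs sep).1 _h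
  have hle : sep.length ≤ cs.length := hinf.length_le
  have hpos : 0 < sep.length := List.length_pos_iff.mpr hsep
  simp only [List.length_drop]
  omega

def iterate_on_string_alt (xml_string : String) (separator : String) (verbose : Bool) : List (String × Int) :=
  if h : separator = "" then []  -- Source B raises ValueError here; excluded by Pre_
  else
    pvAltGo separator.toList
      (fun hn => h (by rw [← @String.ofList_toList separator, hn]))
      xml_string.toList 0

-- ===== PRECONDITION & SPEC =====
-- Pre_ excludes only separator = "", on which Python A raises ValueError (str.split with empty separator).
def Pre_iterate_on_string (xml_string : String) (separator : String) (verbose : Bool) : Prop :=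
  separator ≠ ""
instance (xml_string : String) (separator : String) (verbose : Bool) : Decidable (Pre_iterate_on_string xml_string separator verbose) := by unfold Pre_iterate_on_string; infer_instance

def pvWitness_iterate_on_string : String × String × Bool := ("ab\ncd\nef", "\n", false)

def Spec_iterate_on_string (xml_string : String) (separator : String) (verbose : Bool) (out : List (String × Int)) : Prop := out = iterate_on_string_alt xml_string separator verbose
instance (xml_string : String) (separator : String) (verbose : Bool) (out : List (String × Int)) : Decidable (Spec_iterate_on_string xml_string separator verbose out) := by unfold Spec_iterate_on_string; infer_instance

-- ===== CLAIM (what is proved, stated in full; the proofs are below) =====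
def Claim_equal_iterate_on_string : Prop := ∀ (xml_string : String) (separator : String) (verbose : Bool), Dom_iterate_on_string xml_string separator verbose → Pre_iterate_on_string xml_string separator verbose → Spec_iterate_on_string xml_string separator verbose (iterate_on_string xml_string separator verbose)

-- ===== LEMMAS AND PROOFS =====

-- prepend a prefix onto the first piece (what splitOn.go's `cur` accumulator does)
def pvConsHead (p : List Char) : List (List Char) → List (List Char)
  | [] => [p]
  | x :: xs => (p ++ x) :: xs

-- the `.pop()` of a trailing empty piece
def pvDropTrail (l : List (List Char)) : List (List Char) :=
  if l.getLast? = some [] then l.dropLast else l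

-- the yield loop of A, at the char-list level
def pvEmit (sep : List Char) : List (List Char) → Int → List (String × Int)
  | [], _ => []
  | p :: rest, pos =>
      (String.ofList (p ++ sep), pos) :: pvEmit sep rest (pos + (p.length : Int) + (sep.length : Int))

theorem pvConsHead_nil (l : List (List Char)) (h : l ≠ []) : pvConsHead [] l = l := by
  cases l with
  | nil => exact absurd rfl h
  | cons x xs => simp [pvConsHead]

theorem pvFind_nil (sep : List Char) (hsep : sep ≠ []) : PySem.Chars.find [] sep = -1 := by
  simp [PySem.Chars.find, PySem.Chars.find.go, List.isEmpty_iff, hsep]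

theorem pvFindGoOff (sep : List Char) (hsep : sep ≠ []) :
    ∀ (l : List Char) (k : Nat),
      PySem.Chars.find.go sep l k =
        if PySem.Chars.find.go sep l 0 = -1 then -1
        else (k : Int) + PySem.Chars.find.go sep l 0 := by
  intro l
  induction l with
  | nil => intro k; simp [PySem.Chars.find.go, List.isEmpty_iff, hsep]
  | cons c t ih =>
    intro k
    by_cases hp : sep.isPrefixOf (c :: t)
    · simp [PySem.Chars.find.go, hp]
    · rw [show PySem.Chars.find.go sep (c :: t) k = PySem.Chars.find.go sep t (k + 1) by
        simp [PySem.Chars.find.go, hp],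
        show PySem.Chars.find.go sep (c :: t) 0 = PySem.Chars.find.go sep t 1 by
        simp [PySem.Chars.find.go, hp],
        ih (k + 1), ih 1]
      have hge : -1 ≤ PySem.Chars.find.go sep t 0 := PySem.Chars.neg_one_le_find t sep
      by_cases h0 : PySem.Chars.find.go sep t 0 = -1
      · simp [h0]
      · have h1 : ¬(1 + PySem.Chars.find.go sep t 0 = -1) := by omega
        simp [h0, h1]
        omega

theorem pvFind_cons_pos (sep : List Char) (c : Char) (t : List Char)
    (hp : sep.isPrefixOf (c :: t)) : PySem.Chars.find (c :: t) sep = 0 := by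
  simp [PySem.Chars.find, PySem.Chars.find.go, hp]

theorem pvFind_cons_neg (sep : List Char) (hsep : sep ≠ []) (c : Char) (t : List Char)
    (hp : ¬ sep.isPrefixOf (c :: t)) :
    PySem.Chars.find (c :: t) sep =
      if PySem.Chars.find t sep = -1 then -1 else 1 + PySem.Chars.find t sep := by
  rw [show PySem.Chars.find (c :: t) sep = PySem.Chars.find.go sep t 1 by
    simp [PySem.Chars.find, PySem.Chars.find.go, hp]]
  rw [pvFindGoOff sep hsep t 1]
  rfl

theorem pvGo_ne_nil (sep : List Char) :
    ∀ (fuel : Nat) (cs cur : List Char) (acc : List (List Char)),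
      PySem.Chars.splitOn.go sep fuel cs cur acc ≠ [] := by
  intro fuel
  induction fuel with
  | zero => intro cs cur acc; simp [PySem.Chars.splitOn.go]
  | succ f ih =>
    intro cs cur acc
    cases cs with
    | nil => simp [PySem.Chars.splitOn.go]
    | cons c t =>
      by_cases hp : sep.isPrefixOf (c :: t)
      · rw [show PySem.Chars.splitOn.go sep (f+1) (c :: t) cur acc
            = PySem.Chars.splitOn.go sep f ((c :: t).drop sep.length) [] (cur.reverse :: acc) by
          simp [PySem.Chars.splitOn.go, hp]]
        exact ih _ _ _
      · rw [show PySem.Chars.splitOn.go sep (f+1) (c :: t) cur acc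
            = PySem.Chars.splitOn.go sep f t (c :: cur) acc by
          simp [PySem.Chars.splitOn.go, hp]]
        exact ih _ _ _

theorem pvSplitOn_ne_nil (sep cs : List Char) : PySem.Chars.splitOn cs sep ≠ [] :=
  pvGo_ne_nil sep _ cs [] []

theorem pvConsHead_consHead (p q : List Char) (l : List (List Char)) :
    pvConsHead p (pvConsHead q l) = pvConsHead (p ++ q) l := by
  cases l <;> simp [pvConsHead]

theorem pvGo_step_nil (sep : List Char) (f : Nat) (cur : List Char) (acc : List (List Char)) :
    PySem.Chars.splitOn.go sep (f + 1) [] cur acc = (cur.reverse :: acc).reverse := by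
  simp [PySem.Chars.splitOn.go]

theorem pvGo_step_pos (sep : List Char) (f : Nat) (c : Char) (t cur : List Char)
    (acc : List (List Char)) (hp : sep.isPrefixOf (c :: t)) :
    PySem.Chars.splitOn.go sep (f + 1) (c :: t) cur acc
      = PySem.Chars.splitOn.go sep f ((c :: t).drop sep.length) [] (cur.reverse :: acc) := by
  simp [PySem.Chars.splitOn.go, hp]

theorem pvGo_step_neg (sep : List Char) (f : Nat) (c : Char) (t cur : List Char)
    (acc : List (List Char)) (hp : ¬ sep.isPrefixOf (c :: t)) :
    PySem.Chars.splitOn.go sep (f + 1) (c :: t) cur acc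
      = PySem.Chars.splitOn.go sep f t (c :: cur) acc := by
  simp [PySem.Chars.splitOn.go, hp]

theorem pvGgo (sep : List Char) (hsep : sep ≠ []) :
    ∀ (N : Nat) (cs : List Char), cs.length ≤ N →
      ∀ (fuel : Nat) (cur : List Char) (acc : List (List Char)), cs.length < fuel →
        PySem.Chars.splitOn.go sep fuel cs cur acc =
          acc.reverse ++ pvConsHead cur.reverse (PySem.Chars.splitOn cs sep) := by
  intro N
  induction N with
  | zero =>
    intro cs hcs fuel cur acc hf
    have hnil : cs = [] := List.length_eq_zero_iff.mp (Nat.le_zero.mp hcs)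
    subst hnil
    obtain ⟨f, rfl⟩ : ∃ k, fuel = k + 1 := ⟨fuel - 1, by omega⟩
    rw [pvGo_step_nil]
    simp [PySem.Chars.splitOn, pvGo_step_nil, pvConsHead]
  | succ n ih =>
    intro cs hcs fuel cur acc hf
    obtain ⟨f, rfl⟩ : ∃ k, fuel = k + 1 := ⟨fuel - 1, by omega⟩
    cases cs with
    | nil =>
      rw [pvGo_step_nil]
      simp [PySem.Chars.splitOn, pvGo_step_nil, pvConsHead]
    | cons c t =>
      have hsl : 1 ≤ sep.length := List.length_pos_iff.mpr hsep
      by_cases hp : sep.isPrefixOf (c :: t)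
      · have hdl : ((c :: t).drop sep.length).length ≤ n := by
          simp only [List.length_drop, List.length_cons]
          simp only [List.length_cons] at hcs
          omega
        have hS : PySem.Chars.splitOn (c :: t) sep
            = [] :: PySem.Chars.splitOn ((c :: t).drop sep.length) sep := by
          show PySem.Chars.splitOn.go sep ((c :: t).length + 1) (c :: t) [] [] = _
          rw [pvGo_step_pos sep _ c t [] [] hp]
          rw [ih _ hdl _ _ _ (by simp only [List.length_drop, List.length_cons]; omega)]
          simp only [List.reverse_nil]
          rw [pvConsHead_nil _ (pvSplitOn_ne_nil sep _)]
          simp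
        rw [pvGo_step_pos sep f c t cur acc hp]
        rw [ih _ hdl _ _ _ (by simp only [List.length_drop, List.length_cons]
                               simp only [List.length_cons] at hf; omega)]
        simp only [List.reverse_nil]
        rw [pvConsHead_nil _ (pvSplitOn_ne_nil sep _), hS]
        simp [pvConsHead]
      · have hdl : t.length ≤ n := by simp only [List.length_cons] at hcs; omega
        have hS : PySem.Chars.splitOn (c :: t) sep = pvConsHead [c] (PySem.Chars.splitOn t sep) := by
          show PySem.Chars.splitOn.go sep ((c :: t).length + 1) (c :: t) [] [] = _
          rw [pvGo_step_neg sep _ c t [] [] hp]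
          rw [ih _ hdl _ _ _ (by simp)]
          simp
        rw [pvGo_step_neg sep f c t cur acc hp]
        rw [ih _ hdl _ _ _ (by simp only [List.length_cons] at hf; omega), hS,
          pvConsHead_consHead]
        simp

theorem pvSplitOn_nil (sep : List Char) : PySem.Chars.splitOn [] sep = [[]] := rfl

theorem pvSplitOn_cons_pos (sep : List Char) (hsep : sep ≠ []) (c : Char) (t : List Char)
    (hp : sep.isPrefixOf (c :: t)) :
    PySem.Chars.splitOn (c :: t) sep = [] :: PySem.Chars.splitOn ((c :: t).drop sep.length) sep := by
  have hsl : 1 ≤ sep.length := List.length_pos_iff.mpr hsep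
  show PySem.Chars.splitOn.go sep ((c :: t).length + 1) (c :: t) [] [] = _
  rw [pvGo_step_pos sep _ c t [] [] hp]
  rw [pvGgo sep hsep ((c :: t).drop sep.length).length _ le_rfl _ _ _
      (by simp only [List.length_drop, List.length_cons]; omega)]
  simp only [List.reverse_nil]
  rw [pvConsHead_nil _ (pvSplitOn_ne_nil sep _)]
  simp

theorem pvSplitOn_cons_neg (sep : List Char) (hsep : sep ≠ []) (c : Char) (t : List Char)
    (hp : ¬ sep.isPrefixOf (c :: t)) :
    PySem.Chars.splitOn (c :: t) sep = pvConsHead [c] (PySem.Chars.splitOn t sep) := by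
  show PySem.Chars.splitOn.go sep ((c :: t).length + 1) (c :: t) [] [] = _
  rw [pvGo_step_neg sep _ c t [] [] hp]
  rw [pvGgo sep hsep t.length t le_rfl _ _ _ (by simp)]
  simp

theorem pvSplitOn_none (sep : List Char) (hsep : sep ≠ []) :
    ∀ cs : List Char, PySem.Chars.find cs sep = -1 → PySem.Chars.splitOn cs sep = [cs] := by
  intro cs
  induction cs with
  | nil => intro _; exact pvSplitOn_nil sep
  | cons c t ih =>
    intro h
    by_cases hp : sep.isPrefixOf (c :: t)
    · rw [pvFind_cons_pos sep c t hp] at h; exact absurd h (by decide)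
    · have ht : PySem.Chars.find t sep = -1 := by
        have := pvFind_cons_neg sep hsep c t hp
        rw [h] at this
        by_cases h0 : PySem.Chars.find t sep = -1
        · exact h0
        · have hge : -1 ≤ PySem.Chars.find t sep := PySem.Chars.neg_one_le_find t sep
          simp only [h0, if_false] at this
          omega
      rw [pvSplitOn_cons_neg sep hsep c t hp, ih ht]
      simp [pvConsHead]

theorem pvSplitOn_some (sep : List Char) (hsep : sep ≠ []) :
    ∀ cs : List Char, PySem.Chars.find cs sep ≠ -1 →
      PySem.Chars.splitOn cs sep =
        (cs.take (PySem.Chars.find cs sep).toNat) ::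
          PySem.Chars.splitOn (cs.drop ((PySem.Chars.find cs sep).toNat + sep.length)) sep := by
  intro cs
  induction cs with
  | nil => intro h; exact absurd (pvFind_nil sep hsep) h
  | cons c t ih =>
    intro h
    by_cases hp : sep.isPrefixOf (c :: t)
    · rw [pvFind_cons_pos sep c t hp]
      simpa using pvSplitOn_cons_pos sep hsep c t hp
    · have hft := pvFind_cons_neg sep hsep c t hp
      have ht : PySem.Chars.find t sep ≠ -1 := by
        intro h0; rw [hft, if_pos h0] at h; exact h rfl
      have hge : 0 ≤ PySem.Chars.find t sep := by
        have := PySem.Chars.neg_one_le_find t sep; omega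
      rw [hft, if_neg ht] at h ⊢
      rw [pvSplitOn_cons_neg sep hsep c t hp, ih ht]
      have htn : (1 + PySem.Chars.find t sep).toNat = (PySem.Chars.find t sep).toNat + 1 := by
        omega
      rw [htn]
      simp only [pvConsHead, List.take_succ_cons, List.singleton_append]
      congr 1
      rw [show (PySem.Chars.find t sep).toNat + 1 + sep.length
          = ((PySem.Chars.find t sep).toNat + sep.length) + 1 from by omega,
        List.drop_succ_cons]

theorem pvDropTrail_cons (x : List Char) (l : List (List Char)) (h : l ≠ []) :
    pvDropTrail (x :: l) = x :: pvDropTrail l := by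
  cases l with
  | nil => exact absurd rfl h
  | cons y ys =>
    unfold pvDropTrail
    rw [List.getLast?_cons_cons, List.dropLast_cons₂]
    by_cases hy : (y :: ys).getLast? = some [] <;> simp [hy]

theorem pvMain (sep : List Char) (hsep : sep ≠ []) :
    ∀ (N : Nat) (cs : List Char), cs.length ≤ N → ∀ (pos : Int),
      pvEmit sep (pvDropTrail (PySem.Chars.splitOn cs sep)) pos = pvAltGo sep hsep cs pos := by
  intro N
  induction N with
  | zero =>
    intro cs hcs pos
    have hnil : cs = [] := List.length_eq_zero_iff.mp (Nat.le_zero.mp hcs)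
    subst hnil
    rw [pvSplitOn_nil sep, pvAltGo]
    simp [pvDropTrail, pvEmit, pvFind_nil sep hsep]
  | succ n ih =>
    intro cs hcs pos
    by_cases hfind : PySem.Chars.find cs sep = -1
    · rw [pvSplitOn_none sep hsep cs hfind, pvAltGo]
      cases cs with
      | nil => simp [pvDropTrail, pvEmit, hfind]
      | cons c t => simp [pvDropTrail, pvEmit, hfind]
    · have hge : 0 ≤ PySem.Chars.find cs sep := by
        have := PySem.Chars.neg_one_le_find cs sep; omega
      have hlen : PySem.Chars.find cs sep ≤ (cs.length : Int) := PySem.Chars.find_le_length cs sep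
      have hsl : 1 ≤ sep.length := List.length_pos_iff.mpr hsep
      have hcs1 : 1 ≤ cs.length := by
        cases cs with
        | nil => exact absurd (pvFind_nil sep hsep) hfind
        | cons _ _ => simp
      rw [pvSplitOn_some sep hsep cs hfind]
      rw [pvDropTrail_cons _ _ (pvSplitOn_ne_nil sep _)]
      have htake : (cs.take (PySem.Chars.find cs sep).toNat).length
          = (PySem.Chars.find cs sep).toNat := by
        simp only [List.length_take]
        omega
      rw [pvAltGo]
      simp only [hfind, dite_false, pvEmit, htake]
      have hrec := ih (cs.drop ((PySem.Chars.find cs sep).toNat + sep.length))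
        (by simp only [List.length_drop]; omega)
        (pos + ((PySem.Chars.find cs sep).toNat : Int) + (sep.length : Int))
      rw [hrec]
      have hcast : ((PySem.Chars.find cs sep).toNat : Int) = PySem.Chars.find cs sep :=
        Int.toNat_of_nonneg hge
      rw [hcast]

-- A's yield loop over Str pieces
def pvEmitS (sepS : String) : List String → Int → List (String × Int)
  | [], _ => []
  | p :: rest, pos =>
      (p ++ sepS, pos) :: pvEmitS sepS rest (pos + PySem.Str.len (p ++ sepS))

theorem pvAfold (sepS : String) :
    ∀ (ps : List String) (acc : List (String × Int)) (pos : Int),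
      (ps.foldl
        (fun (st : List (String × Int) × Int) substring0 =>
          let substring := substring0 ++ sepS
          (st.1 ++ [(substring, st.2)], st.2 + PySem.Str.len substring))
        (acc, pos)).1 = acc ++ pvEmitS sepS ps pos := by
  intro ps
  induction ps with
  | nil => intro acc pos; simp [pvEmitS]
  | cons p rest ih =>
    intro acc pos
    simp only [List.foldl_cons, pvEmitS]
    rw [ih]
    simp

theorem pvEmitS_map (sepS : String) :
    ∀ (css : List (List Char)) (pos : Int),
      pvEmitS sepS (css.map String.ofList) pos = pvEmit sepS.toList css pos := by
  intro css
  induction css with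
  | nil => intro pos; simp [pvEmitS, pvEmit]
  | cons p rest ih =>
    intro pos
    have hofl : String.ofList p ++ sepS = String.ofList (p ++ sepS.toList) := by
      conv_lhs => rw [← @String.ofList_toList sepS]
      rw [String.ofList_append]
    simp only [List.map_cons, pvEmitS, pvEmit, hofl, ih]
    congr 1
    congr 1
    rw [PySem.Str.len_eq, String.toList_ofList]
    simp only [List.length_append]
    push_cast
    ring

theorem pvDropTrail_map (css : List (List Char)) :
    (if 0 < (css.map String.ofList).length ∧
        PySem.Str.len (PySem.List.pyGetD (css.map String.ofList) (-1) "") = 0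
     then (css.map String.ofList).dropLast else css.map String.ofList)
      = (pvDropTrail css).map String.ofList := by
  cases hcss : css with
  | nil => simp [pvDropTrail]
  | cons x xs =>
    have hne : (x :: xs).map String.ofList ≠ [] := by simp
    rw [PySem.List.pyGetD_neg_one _ _ hne]
    rw [List.getLast_map (by simp)]
    rw [PySem.Str.len_eq, String.toList_ofList]
    have hlast : (x :: xs).getLast? = some ((x :: xs).getLast (by simp)) :=
      List.getLast?_eq_some_getLast (by simp)
    by_cases hz : (x :: xs).getLast (by simp) = []
    · rw [if_pos (by simp [hz])]
      unfold pvDropTrail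
      rw [hlast, hz, if_pos rfl, List.map_dropLast]
    · rw [if_neg (by simp [List.length_eq_zero_iff, hz])]
      unfold pvDropTrail
      rw [hlast, if_neg (by simpa using hz)]

-- ===== VERDICT (by name: the statement is the Claim_ definition above) =====
theorem iterate_on_string_spec : Claim_equal_iterate_on_string := by
  intro xml_string separator verbose _hdom hpre
  unfold Spec_iterate_on_string iterate_on_string iterate_on_string_alt
  have hsepl : separator.toList ≠ [] := by
    intro hn
    exact hpre (by rw [← @String.ofList_toList separator, hn])
  rw [show PySem.Str.split? xml_string separator
      = some ((PySem.Chars.splitOn xml_string.toList separator.toList).map String.ofList) by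
    simp [PySem.Str.split?, PySem.Chars.split?, List.isEmpty_iff, hsepl]]
  simp only
  rw [dif_neg hpre]
  rw [pvAfold, pvDropTrail_map, pvEmitS_map]
  simpa using pvMain separator.toList hsepl xml_string.toList.length xml_string.toList le_rfl 0
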